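-- pv_equiv track=rewrite | github.com/orquestacomunitariagc/web | database/web.py | get_dict_data
-- ===== SOURCE A (Python) =====
-- def get_dict_data(data, list):
--     dict_data = {}
--     for item in list:
--         dict_data[item] = [f"{row[0]} {row[1]}" for row in data if row[2] == item]
--
--     delete_keys = [key for key in dict_data if len(dict_data[key]) == 0]
--     for key in delete_keys:
--         del dict_data[key]
--
--     return dict_data
-- ===== SOURCE B (Python) =====
-- def get_dict_data(data, list):
--     # Index every row once by its category, then select the requested categories.
--     groups = {}
--     for row in data:
--         groups.setdefault(row[2], []).append(f"{row[0]} {row[1]}")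
--     result = {}
--     for item in list:
--         if item in groups:
--             result[item] = groups[item]
--     return result
-- ===== Notes on version B (the rewrite author's own statement) =====
-- stated objective: faster
-- what changed: B builds a single hash index of all rows grouped by category in one pass over data, then selects the requested categories, instead of A's per-category rescans of data followed by a delete-empty pass.
import Mathlib
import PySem

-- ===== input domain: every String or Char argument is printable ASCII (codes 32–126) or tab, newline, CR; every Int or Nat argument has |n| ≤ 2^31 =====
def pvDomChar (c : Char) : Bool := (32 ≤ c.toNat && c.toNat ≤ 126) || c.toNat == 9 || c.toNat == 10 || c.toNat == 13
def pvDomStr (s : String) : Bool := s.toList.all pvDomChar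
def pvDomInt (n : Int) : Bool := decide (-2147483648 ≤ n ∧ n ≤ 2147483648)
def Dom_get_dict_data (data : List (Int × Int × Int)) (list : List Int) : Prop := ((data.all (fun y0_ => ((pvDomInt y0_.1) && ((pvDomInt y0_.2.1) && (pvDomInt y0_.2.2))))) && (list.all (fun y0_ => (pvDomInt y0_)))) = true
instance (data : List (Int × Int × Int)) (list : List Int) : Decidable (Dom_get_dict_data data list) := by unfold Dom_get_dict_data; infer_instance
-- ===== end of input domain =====

-- B indexes all rows by category in one pass over data and then selects the requested
-- categories (objective: faster), instead of A's per-category rescan of data plus a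
-- delete-empty pass.


-- f"{row[0]} {row[1]}" (formatting helper shared by both ports)
def pvFmt (row : Int × Int × Int) : String :=
  PySem.Int.toStr row.1 ++ " " ++ PySem.Int.toStr row.2.1

-- ===== PORT A =====
def get_dict_data (data : List (Int × Int × Int)) (list : List Int) : List (Int × List String) :=
  -- dict_data = {}; for item in list: dict_data[item] = [f"{row[0]} {row[1]}" for row in data if row[2] == item]
  let dict_data : PySem.Dict Int (List String) :=
    list.foldl (fun d item =>
      d.insert item ((data.filter (fun row => row.2.2 == item)).map (fun row => pvFmt row)))
      PySem.Dict.empty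
  -- delete_keys = [key for key in dict_data if len(dict_data[key]) == 0]
  let delete_keys : List Int :=
    dict_data.keys.foldl (fun acc key =>
      if (dict_data.getD key []).length == 0 then acc ++ [key] else acc) []
  -- for key in delete_keys: del dict_data[key]
  let dict_data2 := delete_keys.foldl (fun d key => d.erase key) dict_data
  dict_data2.items

-- ===== PORT B =====
def get_dict_data_alt (data : List (Int × Int × Int)) (list : List Int) : List (Int × List String) :=
  -- groups = {}; for row in data: groups.setdefault(row[2], []).append(f"{row[0]} {row[1]}")
  let groups : PySem.Dict Int (List String) :=
    data.foldl (fun g row => g.modify row.2.2 [] (fun l => l ++ [pvFmt row])) PySem.Dict.empty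
  -- result = {}; for item in list: if item in groups: result[item] = groups[item]
  let result : PySem.Dict Int (List String) :=
    list.foldl (fun r item =>
      if groups.contains item then r.insert item (groups.getD item []) else r)
      PySem.Dict.empty
  result.items

-- ===== PRECONDITION & SPEC =====
def Spec_get_dict_data (data : List (Int × Int × Int)) (list : List Int) (out : List (Int × List String)) : Prop := out = get_dict_data_alt data list
instance (data : List (Int × Int × Int)) (list : List Int) (out : List (Int × List String)) : Decidable (Spec_get_dict_data data list out) := by unfold Spec_get_dict_data; infer_instance

-- ===== CLAIM (what is proved, stated in full; the proofs are below) =====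
def Claim_equal_get_dict_data : Prop := ∀ (data : List (Int × Int × Int)) (list : List Int), Dom_get_dict_data data list → Spec_get_dict_data data list (get_dict_data data list)

-- ===== LEMMAS AND PROOFS =====

-- the rows of category c, formatted — the common value both programs store under key c
def pvGroup (data : List (Int × Int × Int)) (c : Int) : List String :=
  (data.filter (fun row => row.2.2 == c)).map (fun row => pvFmt row)

-- lookup after a loop of inserts whose value is a function of the key
theorem pv_getD_foldl_insert_fn (l : List Int) (f : Int → List String)
    (d : PySem.Dict Int (List String)) (k : Int) (dflt : List String) :
    (l.foldl (fun d x => d.insert x (f x)) d).getD k dflt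
      = if k ∈ l then f k else d.getD k dflt := by
  induction l generalizing d with
  | nil => simp
  | cons x t ih =>
    simp only [List.foldl_cons, ih, PySem.Dict.getD_insert, List.mem_cons]
    by_cases h1 : k ∈ t <;> by_cases h2 : k = x <;> simp [h1, h2]

-- keys of such a loop from the empty dict: the distinct keys in first-occurrence order
theorem pv_keys_foldl_insert_fn (l : List Int) (f : Int → List String) :
    (l.foldl (fun d x => d.insert x (f x)) (PySem.Dict.empty : PySem.Dict Int (List String))).keys
      = PySem.Set.ofList l := by
  rw [PySem.Dict.keys_foldl_insert]
  simp [PySem.Set.ofList, PySem.Set.update]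

-- items of such a loop from the empty dict
theorem pv_items_foldl_insert_fn (l : List Int) (f : Int → List String) :
    (l.foldl (fun d x => d.insert x (f x)) (PySem.Dict.empty : PySem.Dict Int (List String))).items
      = (PySem.Set.ofList l).map (fun k => (k, f k)) := by
  have hnd : (l.foldl (fun d x => d.insert x (f x)) PySem.Dict.empty).keys.Nodup :=
    PySem.Dict.nodup_keys_foldl_insert l (fun _ x => f x) _ PySem.Dict.nodup_keys_empty
  rw [PySem.Dict.items_eq_map_keys _ hnd [], pv_keys_foldl_insert_fn]
  apply List.map_congr_left
  intro k hk
  have : k ∈ l := (PySem.Set.mem_ofList l k).mp hk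
  simp [pv_getD_foldl_insert_fn, this]

-- items after a loop of erases: the erased keys are filtered out
theorem pv_items_foldl_erase (ks : List Int) (d : PySem.Dict Int (List String)) :
    (ks.foldl (fun d k => d.erase k) d).items
      = d.items.filter (fun p => !(ks.contains p.1)) := by
  induction ks generalizing d with
  | nil => simp
  | cons x t ih =>
    rw [List.foldl_cons, ih]
    simp only [PySem.Dict.erase, List.filter_filter]
    apply List.filter_congr
    intro p _
    by_cases h1 : p.1 = x <;> by_cases h2 : p.1 ∈ t <;> simp [h1, h2]

-- set(·) commutes with filtering (one Set.add step)
theorem pv_set_add_filter (s : PySem.Set Int) (p : Int → Bool) (x : Int) :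
    (PySem.Set.add s x).filter p
      = if p x then PySem.Set.add (s.filter p) x else s.filter p := by
  by_cases hm : x ∈ s
  · by_cases hp : p x
    · have hm2 : x ∈ s.filter p := List.mem_filter.mpr ⟨hm, hp⟩
      simp [PySem.Set.add, hm, hp, hm2]
    · simp [PySem.Set.add, hm, hp]
  · by_cases hp : p x
    · have hm2 : x ∉ s.filter p := fun h => hm (List.mem_filter.mp h).1
      simp [PySem.Set.add, hm, hp, hm2, List.filter_append]
    · simp [PySem.Set.add, hm, hp, List.filter_append]

-- set(·) commutes with filtering
theorem pv_set_ofList_filter (l : List Int) (p : Int → Bool) :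
    PySem.Set.ofList (l.filter p) = (PySem.Set.ofList l).filter p := by
  suffices h : ∀ (s : PySem.Set Int), (l.filter p).foldl PySem.Set.add (s.filter p)
      = (l.foldl PySem.Set.add s).filter p by
    simpa using h ([] : PySem.Set Int)
  induction l with
  | nil => intro s; simp
  | cons x t ih =>
    intro s
    rw [List.foldl_cons, ← ih, pv_set_add_filter]
    by_cases hp : p x <;> simp [hp]

-- B's index: looking up a category yields exactly its group
theorem pv_getD_groups (data : List (Int × Int × Int)) (c : Int) :
    (data.foldl (fun g row => g.modify row.2.2 [] (fun l => l ++ [pvFmt row]))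
        (PySem.Dict.empty : PySem.Dict Int (List String))).getD c []
      = pvGroup data c := by
  have h : data.foldl (fun g row => g.modify row.2.2 [] (fun l => l ++ [pvFmt row]))
        (PySem.Dict.empty : PySem.Dict Int (List String))
      = (data.map (fun row => (row.2.2, pvFmt row))).foldl
          (fun d p => d.modify p.1 [] (fun l => l ++ [p.2])) PySem.Dict.empty := by
    rw [List.foldl_map]
  rw [h, PySem.Dict.getD_foldl_modify_append, List.filter_map, List.map_map]
  simp [pvGroup, Function.comp_def]

-- B's membership test in the index is "the group is nonempty"
theorem pv_contains_groups (data : List (Int × Int × Int)) (c : Int) :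
    (data.foldl (fun g row => g.modify row.2.2 [] (fun l => l ++ [pvFmt row]))
        (PySem.Dict.empty : PySem.Dict Int (List String))).contains c
      = !((pvGroup data c).length == 0) := by
  rw [PySem.Dict.contains_eq_decide_mem_keys, PySem.Dict.keys_foldl_modify_key]
  have h2 : (c ∈ data.map (fun row => row.2.2)) ↔ pvGroup data c ≠ [] := by
    simp [pvGroup, List.mem_map, List.filter_eq_nil_iff]
  by_cases hc : pvGroup data c = []
  · simp [hc, h2]
  · simp [hc, h2, List.length_eq_zero_iff]

-- A's result in closed form
theorem pv_A_eq (data : List (Int × Int × Int)) (list : List Int) :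
    get_dict_data data list
      = ((PySem.Set.ofList list).filter (fun k => !((pvGroup data k).length == 0))).map
          (fun k => (k, pvGroup data k)) := by
  unfold get_dict_data
  simp only []
  set dA := list.foldl (fun d item =>
      d.insert item ((data.filter (fun row => row.2.2 == item)).map (fun row => pvFmt row)))
      (PySem.Dict.empty : PySem.Dict Int (List String)) with hdA
  rw [PySem.List.foldl_append_if_eq_filter, List.nil_append, pv_items_foldl_erase]
  rw [hdA, pv_items_foldl_insert_fn list
        (fun item => (data.filter (fun row => row.2.2 == item)).map (fun row => pvFmt row))]
  rw [List.filter_map]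
  apply congrArg (List.map _)
  rw [← hdA]
  have hq : dA.keys.filter (fun key => (dA.getD key []).length == 0)
      = (PySem.Set.ofList list).filter (fun k => (pvGroup data k).length == 0) := by
    rw [hdA, pv_keys_foldl_insert_fn]
    apply List.filter_congr
    intro k hk
    have hkl : k ∈ list := (PySem.Set.mem_ofList list k).mp hk
    rw [pv_getD_foldl_insert_fn]
    simp [hkl, pvGroup]
  rw [hq]
  apply List.filter_congr
  intro k hk
  simp only [Function.comp]
  by_cases hz : (pvGroup data k).length == 0
  · have : k ∈ (PySem.Set.ofList list).filter (fun k => (pvGroup data k).length == 0) :=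
      List.mem_filter.mpr ⟨hk, hz⟩
    simp [List.contains_eq_mem, this, hz]
  · have : k ∉ (PySem.Set.ofList list).filter (fun k => (pvGroup data k).length == 0) := by
      intro hmem; exact hz (List.mem_filter.mp hmem).2
    simp [List.contains_eq_mem, this, hz]

-- B's result in the same closed form
theorem pv_B_eq (data : List (Int × Int × Int)) (list : List Int) :
    get_dict_data_alt data list
      = ((PySem.Set.ofList list).filter (fun k => !((pvGroup data k).length == 0))).map
          (fun k => (k, pvGroup data k)) := by
  unfold get_dict_data_alt
  simp only []
  set groups := data.foldl (fun g row => g.modify row.2.2 [] (fun l => l ++ [pvFmt row]))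
      (PySem.Dict.empty : PySem.Dict Int (List String)) with hg
  rw [PySem.List.foldl_if_eq_foldl_filter]
  rw [pv_items_foldl_insert_fn (list.filter (fun item => groups.contains item))
        (fun item => groups.getD item [])]
  rw [pv_set_ofList_filter]
  have hfil : (PySem.Set.ofList list).filter (fun item => groups.contains item)
      = (PySem.Set.ofList list).filter (fun k => !((pvGroup data k).length == 0)) := by
    apply List.filter_congr
    intro k _
    rw [hg, pv_contains_groups]
  rw [hfil]
  apply List.map_congr_left
  intro k _
  rw [hg, pv_getD_groups]

-- ===== VERDICT (by name: the statement is the Claim_ definition above) =====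
theorem get_dict_data_spec : Claim_equal_get_dict_data := by
  intro data list _
  unfold Spec_get_dict_data
  rw [pv_A_eq, pv_B_eq]
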